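-- pv_equiv track=rewrite | github.com/Adityapfm99/fund-analysis-system | backend/app/services/table_parser.py | classify_table
-- ===== SOURCE A (Python) =====
-- from typing import List, Dict, Any
--
-- def classify_table(table: List[List[str]]) -> str:
--     """
--     Classify table type based on header row (robust, flexible, logging)
--     Returns: 'capital_calls', 'distributions', 'adjustments', or 'unknown'
--     """
--     if not table or not table[0]:
--         return 'unknown'
--     header = [h.lower().replace(' ', '').replace('-', '').replace('_', '') for h in table[0]]
--     if (any('call' in h for h in header) or any('callnumber' in h for h in header)) and any('amount' in h for h in header):
--         return 'capital_calls'
--     if any('distribution' in h for h in header) or any('recallable' in h for h in header) or any('type' in h for h in header):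
--         return 'distributions'
--     if any('adjustment' in h for h in header) or any('contribution' in h for h in header) or any('category' in h for h in header):
--         return 'adjustments'
--     return 'unknown'
-- ===== SOURCE B (Python) =====
-- def classify_table(table):
--     """
--     Classify table type based on header row.
--     Single pass over the header: normalize each cell once and fold four
--     category flags, then decide from the flags ('callnumber' is subsumed
--     by 'call').
--     """
--     if not table or not table[0]:
--         return 'unknown'
--     call = amount = dist = adj = False
--     for h in table[0]:
--         n = h.lower().replace(' ', '').replace('-', '').replace('_', '')
--         call = call or 'call' in n
--         amount = amount or 'amount' in n
--         dist = dist or 'distribution' in n or 'recallable' in n or 'type' in n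
--         adj = adj or 'adjustment' in n or 'contribution' in n or 'category' in n
--     if call and amount:
--         return 'capital_calls'
--     if dist:
--         return 'distributions'
--     if adj:
--         return 'adjustments'
--     return 'unknown'
-- ===== Notes on version B (the rewrite author's own statement) =====
-- stated objective: alternative
-- what changed: Replaces A's nine separate any(...) scans over a prebuilt normalized header list by a single fold over the header that normalizes each cell once and accumulates four boolean category flags (dropping the redundant 'callnumber' test, subsumed by 'call'), then decides from the flags.
import Mathlib
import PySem

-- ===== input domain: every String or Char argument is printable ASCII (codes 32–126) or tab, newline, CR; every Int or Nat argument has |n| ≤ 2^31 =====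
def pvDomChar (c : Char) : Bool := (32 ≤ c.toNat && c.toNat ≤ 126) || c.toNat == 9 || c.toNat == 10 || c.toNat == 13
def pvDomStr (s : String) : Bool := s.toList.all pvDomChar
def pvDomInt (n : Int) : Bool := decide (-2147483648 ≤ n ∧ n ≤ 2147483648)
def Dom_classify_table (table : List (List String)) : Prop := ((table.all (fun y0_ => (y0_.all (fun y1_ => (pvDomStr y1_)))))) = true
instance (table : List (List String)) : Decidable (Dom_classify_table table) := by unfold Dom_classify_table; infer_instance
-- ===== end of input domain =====

-- B replaces A's nine any(...) scans over the normalized header list by one fold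
-- over the header accumulating four category flags (alternative decomposition).


-- ===== PORT A =====
def classify_table (table : List (List String)) : String :=
  match table with
  | [] => "unknown"
  | row0 :: _ =>
    if row0 = [] then "unknown"
    else
      let header := row0.map (fun h =>
        PySem.Str.replace (PySem.Str.replace (PySem.Str.replace (PySem.Str.lower h) " " "") "-" "") "_" "")
      if (header.any (fun h => PySem.Str.isIn "call" h) || header.any (fun h => PySem.Str.isIn "callnumber" h))
          && header.any (fun h => PySem.Str.isIn "amount" h) then "capital_calls"
      else if header.any (fun h => PySem.Str.isIn "distribution" h) || header.any (fun h => PySem.Str.isIn "recallable" h)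
          || header.any (fun h => PySem.Str.isIn "type" h) then "distributions"
      else if header.any (fun h => PySem.Str.isIn "adjustment" h) || header.any (fun h => PySem.Str.isIn "contribution" h)
          || header.any (fun h => PySem.Str.isIn "category" h) then "adjustments"
      else "unknown"

-- ===== PORT B =====
def pvNormCell (h : String) : String :=
  PySem.Str.replace (PySem.Str.replace (PySem.Str.replace (PySem.Str.lower h) " " "") "-" "") "_" ""

def pvStep (st : Bool × Bool × Bool × Bool) (h : String) : Bool × Bool × Bool × Bool :=
  let n := pvNormCell h
  (st.1 || PySem.Str.isIn "call" n,
   st.2.1 || PySem.Str.isIn "amount" n,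
   st.2.2.1 || PySem.Str.isIn "distribution" n || PySem.Str.isIn "recallable" n || PySem.Str.isIn "type" n,
   st.2.2.2 || PySem.Str.isIn "adjustment" n || PySem.Str.isIn "contribution" n || PySem.Str.isIn "category" n)

def classify_table_alt (table : List (List String)) : String :=
  match table with
  | [] => "unknown"
  | row0 :: _ =>
    if row0 = [] then "unknown"
    else
      let st := row0.foldl pvStep (false, false, false, false)
      if st.1 && st.2.1 then "capital_calls"
      else if st.2.2.1 then "distributions"
      else if st.2.2.2 then "adjustments"
      else "unknown"

-- ===== PRECONDITION & SPEC =====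
def Spec_classify_table (table : List (List String)) (out : String) : Prop := out = classify_table_alt table
instance (table : List (List String)) (out : String) : Decidable (Spec_classify_table table out) := by unfold Spec_classify_table; infer_instance

-- ===== CLAIM (what is proved, stated in full; the proofs are below) =====
def Claim_equal_classify_table : Prop := ∀ (table : List (List String)), Dom_classify_table table → Spec_classify_table table (classify_table table)

-- ===== LEMMAS AND PROOFS =====

-- the fold computes the four 'any' scans
theorem pvFoldl_step (l : List String) (c a d j : Bool) :
    l.foldl pvStep (c, a, d, j) =
      (c || l.any (fun h => PySem.Str.isIn "call" (pvNormCell h)),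
       a || l.any (fun h => PySem.Str.isIn "amount" (pvNormCell h)),
       d || l.any (fun h => PySem.Str.isIn "distribution" (pvNormCell h) || PySem.Str.isIn "recallable" (pvNormCell h)
             || PySem.Str.isIn "type" (pvNormCell h)),
       j || l.any (fun h => PySem.Str.isIn "adjustment" (pvNormCell h) || PySem.Str.isIn "contribution" (pvNormCell h)
             || PySem.Str.isIn "category" (pvNormCell h))) := by
  induction l generalizing c a d j with
  | nil => simp
  | cons x xs ih =>
    simp only [List.foldl_cons, List.any_cons, pvStep, ih]
    simp [Bool.or_assoc]

-- any distributes over a pointwise disjunction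
theorem pvAny_orf {α : Type} (l : List α) (p q : α → Bool) :
    (l.any fun a => p a || q a) = (l.any p || l.any q) := by
  induction l with
  | nil => simp
  | cons x xs ih => simp [ih, Bool.or_assoc, Bool.or_left_comm]

-- 'callnumber' in a cell implies 'call' in that cell
theorem pvCallnumber_call (h : String) :
    PySem.Str.isIn "callnumber" h = true → PySem.Str.isIn "call" h = true := by
  intro hcn
  rw [PySem.Str.isIn_iff_infix] at hcn ⊢
  exact List.IsInfix.trans (by decide) hcn

-- the redundant 'callnumber' scan is absorbed by the 'call' scan
theorem pvAny_call (l : List String) :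
    ((l.any fun h => PySem.Str.isIn "call"
        (PySem.Str.replace (PySem.Str.replace (PySem.Str.replace (PySem.Str.lower h) " " "") "-" "") "_" "")) ||
      l.any fun h => PySem.Str.isIn "callnumber"
        (PySem.Str.replace (PySem.Str.replace (PySem.Str.replace (PySem.Str.lower h) " " "") "-" "") "_" ""))
    = l.any fun h => PySem.Str.isIn "call"
        (PySem.Str.replace (PySem.Str.replace (PySem.Str.replace (PySem.Str.lower h) " " "") "-" "") "_" "" ) := by
  cases hc : l.any fun h => PySem.Str.isIn "callnumber"
      (PySem.Str.replace (PySem.Str.replace (PySem.Str.replace (PySem.Str.lower h) " " "") "-" "") "_" "") with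
  | false => simp
  | true =>
    have hcall : (l.any fun h => PySem.Str.isIn "call"
        (PySem.Str.replace (PySem.Str.replace (PySem.Str.replace (PySem.Str.lower h) " " "") "-" "") "_" "")) = true := by
      rcases List.any_eq_true.mp hc with ⟨x, hx, hxin⟩
      exact List.any_eq_true.mpr ⟨x, hx, pvCallnumber_call _ hxin⟩
    rw [Bool.or_true, hcall]

set_option maxHeartbeats 1000000 in
-- ===== VERDICT (by name: the statement is the Claim_ definition above) =====
theorem classify_table_spec : Claim_equal_classify_table := by
  intro table _
  unfold Spec_classify_table classify_table classify_table_alt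
  cases table with
  | nil => rfl
  | cons row0 rest =>
    by_cases h0 : row0 = []
    · simp [h0]
    · simp only [h0, if_false]
      rw [pvFoldl_step]
      simp only [List.any_map, Function.comp_def, pvNormCell, Bool.false_or, pvAny_orf, Bool.or_assoc]
      rw [pvAny_call]
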